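-- pv_equiv track=rewrite | github.com/vpatrikov/TU-Programming | III Semester/SAA_LB/Optional Task/B1.py | generate_A
-- ===== SOURCE A (Python) =====
-- import heapq
--
-- def generate_A(limit):
--     A = set([1])
--     heap = [1]
--     result = []
--
--     while len(result) < limit:
--         current = heapq.heappop(heap)
--         result.append(current)
--
--         for new_num in [2 * current + 1, 3 * current + 1]:
--             if new_num not in A:
--                 heapq.heappush(heap, new_num)
--                 A.add(new_num)
--
--     return result
-- ===== SOURCE B (Python) =====
-- def generate_A(limit):
--     if limit <= 0:
--         return []
--     result = [1]
--     i2 = i3 = 0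
--     while len(result) < limit:
--         c2 = 2 * result[i2] + 1
--         c3 = 3 * result[i3] + 1
--         nxt = c2 if c2 < c3 else c3
--         result.append(nxt)
--         if c2 == nxt:
--             i2 += 1
--         if c3 == nxt:
--             i3 += 1
--     return result
-- ===== Notes on version B (the rewrite author's own statement) =====
-- stated objective: faster
-- what changed: Replaced the heap+visited-set best-first generation with a two-pointer dynamic program (ugly-numbers style) that merges the 2x+1 and 3x+1 streams over the output list itself, eliminating the heap and the membership set.
import Mathlib
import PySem

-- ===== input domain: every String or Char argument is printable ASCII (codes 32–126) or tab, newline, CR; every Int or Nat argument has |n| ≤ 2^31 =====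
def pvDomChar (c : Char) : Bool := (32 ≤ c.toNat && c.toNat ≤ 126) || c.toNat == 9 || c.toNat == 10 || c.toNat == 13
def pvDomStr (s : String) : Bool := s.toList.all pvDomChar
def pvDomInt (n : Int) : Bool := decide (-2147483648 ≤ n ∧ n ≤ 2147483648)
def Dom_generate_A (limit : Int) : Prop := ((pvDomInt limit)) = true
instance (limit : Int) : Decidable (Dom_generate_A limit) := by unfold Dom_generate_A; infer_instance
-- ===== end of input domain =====

-- B changes the algorithm: a two-pointer DP over the output list replaces A's heap + visited set (asymptotically faster, O(n) vs O(n log n)).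

-- ===== PORT A =====
-- heapq is modelled at call granularity by its specified behaviour: the heap is the list of
-- pending values; heappush appends, heappop returns the minimum value and removes one
-- occurrence of it (exact: only the value sequence of pops is observable here).
-- The 'none' branch is heappop on an empty heap (IndexError in Python); it is unreachable,
-- since the heap starts as [1] and every pop pushes 3*current+1.
def aloopA : Nat → List Int → List Int → PySem.Set Int → List Int
  | 0, res, _, _ => res
  | n+1, res, heap, seen =>
    match PySem.List.min? heap (fun x => x) with
    | none => res
    | some cur =>
      let heap1 := (PySem.List.remove? heap cur).getD heap
      let res1 := res ++ [cur]
      let st := [2*cur+1, 3*cur+1].foldl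
        (fun (st : List Int × PySem.Set Int) v =>
          if PySem.Set.contains st.2 v then st else (st.1 ++ [v], PySem.Set.add st.2 v))
        (heap1, seen)
      aloopA n res1 st.1 st.2

def generate_A (limit : Int) : List Int :=
  aloopA limit.toNat [] [1] (PySem.Set.ofList [1])

-- ===== PORT B =====
-- result[i] (i a nonnegative in-range index): pyGet?; the getD default is unreachable.
def bloopB : Nat → List Int → Nat → Nat → List Int
  | 0, res, _, _ => res
  | n+1, res, i2, i3 =>
    let c2 := 2 * ((PySem.List.pyGet? res (i2 : Int)).getD 0) + 1
    let c3 := 3 * ((PySem.List.pyGet? res (i3 : Int)).getD 0) + 1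
    let nxt := if c2 < c3 then c2 else c3
    let res1 := res ++ [nxt]
    let i2' := if c2 = nxt then i2 + 1 else i2
    let i3' := if c3 = nxt then i3 + 1 else i3
    bloopB n res1 i2' i3'

def generate_A_alt (limit : Int) : List Int :=
  if limit ≤ 0 then [] else bloopB (limit - 1).toNat [1] 0 0

-- ===== PRECONDITION & SPEC =====
def Spec_generate_A (limit : Int) (out : List Int) : Prop := out = generate_A_alt limit
instance (limit : Int) (out : List Int) : Decidable (Spec_generate_A limit out) := by unfold Spec_generate_A; infer_instance

-- ===== CLAIM (what is proved, stated in full; the proofs are below) =====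
def Claim_equal_generate_A : Prop := ∀ (limit : Int), Dom_generate_A limit → Spec_generate_A limit (generate_A limit)

-- ===== LEMMAS AND PROOFS =====

-- The joint simulation invariant between A's loop state (res, heap, seen) and B's (res, i2, i3):
-- res is the common strictly increasing output so far; the heap holds exactly the not-yet-emitted
-- children 2*res[j]+1 (j ≥ i2) and 3*res[j]+1 (j ≥ i3), with both current candidates present.
def SimInv (res heap seen : List Int) (i2 i3 : Nat) : Prop :=
  res.Pairwise (· < ·) ∧
  heap.Nodup ∧
  (∀ v, v ∈ seen ↔ v ∈ res ∨ v ∈ heap) ∧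
  (∀ r ∈ res, ∀ h ∈ heap, r < h) ∧
  (∀ r ∈ res, 1 ≤ r) ∧
  i2 < res.length ∧ i3 < res.length ∧
  (∀ h ∈ heap, ∃ j, j < res.length ∧
      ((i2 ≤ j ∧ h = 2 * res.getD j 0 + 1) ∨ (i3 ≤ j ∧ h = 3 * res.getD j 0 + 1))) ∧
  (2 * res.getD i2 0 + 1 ∈ heap) ∧ (3 * res.getD i3 0 + 1 ∈ heap) ∧
  (∀ j, i2 ≤ j → j < res.length → 2 * res.getD j 0 + 1 ∉ res) ∧
  (∀ j, i3 ≤ j → j < res.length → 3 * res.getD j 0 + 1 ∉ res) ∧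
  (∀ j, j < res.length → 2 * res.getD j 0 + 1 ∈ seen ∧ 3 * res.getD j 0 + 1 ∈ seen)

theorem getD_mono {res : List Int} (hs : res.Pairwise (· < ·))
    {i j : Nat} (hij : i ≤ j) (hj : j < res.length) :
    res.getD i 0 ≤ res.getD j 0 := by
  rcases Nat.eq_or_lt_of_le hij with rfl | hlt
  · exact le_refl _
  · have hi : i < res.length := Nat.lt_trans hlt hj
    have := List.pairwise_iff_getElem.mp hs i j hi hj hlt
    simp [List.getD, hi, hj] at *
    omega

theorem getD_smono {res : List Int} (hs : res.Pairwise (· < ·))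
    {i j : Nat} (hij : i < j) (hj : j < res.length) :
    res.getD i 0 < res.getD j 0 := by
  have hi : i < res.length := Nat.lt_trans hij hj
  have := List.pairwise_iff_getElem.mp hs i j hi hj hij
  simp [List.getD, hi, hj] at *
  omega

theorem getD_mem {res : List Int} {j : Nat} (hj : j < res.length) :
    res.getD j 0 ∈ res := by
  simp [List.getD, hj]

theorem getD_append_lt (res : List Int) (x : Int) {j : Nat} (h : j < res.length) :
    (res ++ [x]).getD j 0 = res.getD j 0 := by
  simp [List.getD, List.getElem?_append_left h]

theorem getD_append_len (res : List Int) (x : Int) :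
    (res ++ [x]).getD res.length 0 = x := by
  simp [List.getD]

theorem mem_append_singleton {res : List Int} {x v : Int} :
    v ∈ res ++ [x] ↔ v ∈ res ∨ v = x := by simp

-- Re-establishing the invariant after one synchronized step that emits the minimum m.
theorem reestablish
    (res heap seen H2 S2 : List Int) (i2 i3 : Nat) (m : Int)
    (hsort : res.Pairwise (· < ·))
    (hseen : ∀ v, v ∈ seen ↔ v ∈ res ∨ v ∈ heap)
    (hlt : ∀ r ∈ res, ∀ h ∈ heap, r < h)
    (hone : ∀ r ∈ res, 1 ≤ r)
    (hi2 : i2 < res.length) (hi3 : i3 < res.length)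
    (hchar : ∀ h ∈ heap, ∃ j, j < res.length ∧
        ((i2 ≤ j ∧ h = 2 * res.getD j 0 + 1) ∨ (i3 ≤ j ∧ h = 3 * res.getD j 0 + 1)))
    (hc2 : 2 * res.getD i2 0 + 1 ∈ heap) (hc3 : 3 * res.getD i3 0 + 1 ∈ heap)
    (hfresh2 : ∀ j, i2 ≤ j → j < res.length → 2 * res.getD j 0 + 1 ∉ res)
    (hfresh3 : ∀ j, i3 ≤ j → j < res.length → 3 * res.getD j 0 + 1 ∉ res)
    (hpushed : ∀ j, j < res.length → 2 * res.getD j 0 + 1 ∈ seen ∧ 3 * res.getD j 0 + 1 ∈ seen)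
    (hmmem : m ∈ heap) (hmin : ∀ y ∈ heap, m ≤ y)
    (hH2nodup : H2.Nodup)
    (hH2mem : ∀ v, v ∈ H2 ↔ (v ∈ heap ∧ v ≠ m) ∨ (v = 2*m+1 ∧ 2*m+1 ∉ seen) ∨ v = 3*m+1)
    (hS2mem : ∀ v, v ∈ S2 ↔ v ∈ seen ∨ v = 2*m+1 ∨ v = 3*m+1) :
    SimInv (res ++ [m]) H2 S2
      (if 2 * res.getD i2 0 + 1 = m then i2 + 1 else i2)
      (if 3 * res.getD i3 0 + 1 = m then i3 + 1 else i3) := by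
  have hresm : ∀ r ∈ res, r < m := fun r hr => hlt r hr m hmmem
  have hm3 : 3 ≤ m := by
    obtain ⟨j, hj, hcase⟩ := hchar m hmmem
    have h1 : 1 ≤ res.getD j 0 := hone _ (getD_mem hj)
    rcases hcase with ⟨_, he⟩ | ⟨_, he⟩ <;> omega
  have hmres : m ∉ res := fun h => lt_irrefl m (hresm m h)
  set i2' := if 2 * res.getD i2 0 + 1 = m then i2 + 1 else i2 with hi2'def
  set i3' := if 3 * res.getD i3 0 + 1 = m then i3 + 1 else i3 with hi3'def
  have hi2'le : i2 ≤ i2' ∧ i2' ≤ i2 + 1 := by rw [hi2'def]; split <;> omega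
  have hi3'le : i3 ≤ i3' ∧ i3' ≤ i3 + 1 := by rw [hi3'def]; split <;> omega
  have hlen : (res ++ [m]).length = res.length + 1 := by simp
  refine ⟨?_, hH2nodup, ?_, ?_, ?_, ?_, ?_, ?_, ?_, ?_, ?_, ?_, ?_⟩
  · -- sorted
    rw [List.pairwise_append]
    exact ⟨hsort, List.pairwise_singleton _ _, fun a ha b hb => by
      simp at hb; subst hb; exact hresm a ha⟩
  · -- seen characterization
    intro v
    rw [hS2mem, mem_append_singleton]
    constructor
    · rintro (hv | rfl | rfl)
      · rcases (hseen v).mp hv with h | h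
        · exact Or.inl (Or.inl h)
        · by_cases hvm : v = m
          · exact Or.inl (Or.inr hvm)
          · exact Or.inr ((hH2mem v).mpr (Or.inl ⟨h, hvm⟩))
      · by_cases h2s : 2*m+1 ∈ seen
        · rcases (hseen _).mp h2s with h | h
          · exact Or.inl (Or.inl h)
          · have : (2*m+1 : Int) ≠ m := by omega
            exact Or.inr ((hH2mem _).mpr (Or.inl ⟨h, this⟩))
        · exact Or.inr ((hH2mem _).mpr (Or.inr (Or.inl ⟨rfl, h2s⟩)))
      · exact Or.inr ((hH2mem _).mpr (Or.inr (Or.inr rfl)))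
    · rintro ((hv | rfl) | hv)
      · exact Or.inl ((hseen v).mpr (Or.inl hv))
      · exact Or.inl ((hseen v).mpr (Or.inr hmmem))
      · rcases (hH2mem v).mp hv with ⟨h, _⟩ | ⟨rfl, _⟩ | rfl
        · exact Or.inl ((hseen v).mpr (Or.inr h))
        · exact Or.inr (Or.inl rfl)
        · exact Or.inr (Or.inr rfl)
  · -- res' < heap'
    intro r hr h hh
    have hrm : r ≤ m := by
      rcases mem_append_singleton.mp hr with h' | h'
      · exact le_of_lt (hresm r h')
      · omega
    rcases (hH2mem h).mp hh with ⟨hhh, hne⟩ | ⟨rfl, _⟩ | rfl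
    · have := hmin h hhh
      have : m < h := lt_of_le_of_ne this (Ne.symm hne)
      omega
    · omega
    · omega
  · -- 1 ≤
    intro r hr
    rcases mem_append_singleton.mp hr with h | h
    · exact hone r h
    · omega
  · rw [hlen]; omega
  · rw [hlen]; omega
  · -- characterization of heap'
    intro h hh
    rcases (hH2mem h).mp hh with ⟨hhh, hne⟩ | ⟨rfl, _⟩ | rfl
    · obtain ⟨j, hj, hcase⟩ := hchar h hhh
      refine ⟨j, by omega, ?_⟩
      rw [getD_append_lt res m hj]
      rcases hcase with ⟨hij, he⟩ | ⟨hij, he⟩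
      · left
        refine ⟨?_, he⟩
        rw [hi2'def]; split
        · rename_i hcm
          rcases Nat.eq_or_lt_of_le hij with rfl | _
          · rw [he, ← hcm] at hne; exact absurd rfl hne
          · omega
        · exact hij
      · right
        refine ⟨?_, he⟩
        rw [hi3'def]; split
        · rename_i hcm
          rcases Nat.eq_or_lt_of_le hij with rfl | _
          · rw [he, ← hcm] at hne; exact absurd rfl hne
          · omega
        · exact hij
    · exact ⟨res.length, by omega, Or.inl ⟨by omega, by rw [getD_append_len]⟩⟩
    · exact ⟨res.length, by omega, Or.inr ⟨by omega, by rw [getD_append_len]⟩⟩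
  · -- candidate 2 present
    rw [hi2'def]
    split
    · rename_i hcm
      rcases Nat.lt_or_ge (i2+1) res.length with hlt2 | hge
      · rw [getD_append_lt res m hlt2]
        have hv : 2 * res.getD (i2+1) 0 + 1 ∈ seen := (hpushed _ hlt2).1
        rcases (hseen _).mp hv with h | h
        · exact absurd h (hfresh2 (i2+1) (by omega) hlt2)
        · have hvm : 2 * res.getD (i2+1) 0 + 1 ≠ m := by
            have := getD_smono hsort (i := i2) (j := i2 + 1) (by omega) hlt2
            omega
          exact (hH2mem _).mpr (Or.inl ⟨h, hvm⟩)
      · have hi2e : i2 + 1 = res.length := by omega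
        rw [hi2e, getD_append_len]
        by_cases h2s : 2*m+1 ∈ seen
        · rcases (hseen _).mp h2s with h | h
          · have := hresm _ h; omega
          · exact (hH2mem _).mpr (Or.inl ⟨h, by omega⟩)
        · exact (hH2mem _).mpr (Or.inr (Or.inl ⟨rfl, h2s⟩))
    · rename_i hcm
      rw [getD_append_lt res m hi2]
      exact (hH2mem _).mpr (Or.inl ⟨hc2, hcm⟩)
  · -- candidate 3 present
    rw [hi3'def]
    split
    · rename_i hcm
      rcases Nat.lt_or_ge (i3+1) res.length with hlt3 | hge
      · rw [getD_append_lt res m hlt3]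
        have hv : 3 * res.getD (i3+1) 0 + 1 ∈ seen := (hpushed _ hlt3).2
        rcases (hseen _).mp hv with h | h
        · exact absurd h (hfresh3 (i3+1) (by omega) hlt3)
        · have hvm : 3 * res.getD (i3+1) 0 + 1 ≠ m := by
            have := getD_smono hsort (i := i3) (j := i3 + 1) (by omega) hlt3
            omega
          exact (hH2mem _).mpr (Or.inl ⟨h, hvm⟩)
      · have hi3e : i3 + 1 = res.length := by omega
        rw [hi3e, getD_append_len]
        exact (hH2mem _).mpr (Or.inr (Or.inr rfl))
    · rename_i hcm
      rw [getD_append_lt res m hi3]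
      exact (hH2mem _).mpr (Or.inl ⟨hc3, hcm⟩)
  · -- freshness 2
    intro j hj hjlen hmem
    rw [hlen] at hjlen
    rcases Nat.lt_or_ge j res.length with hjl | hge
    · rw [getD_append_lt res m hjl] at hmem
      rcases mem_append_singleton.mp hmem with h | h
      · exact hfresh2 j (le_trans hi2'le.1 hj) hjl h
      · -- 2 * res.getD j 0 + 1 = m
        rw [hi2'def] at hj
        by_cases hcm : 2 * res.getD i2 0 + 1 = m
        · rw [if_pos hcm] at hj
          have := getD_smono hsort (show i2 < j by omega) hjl
          omega
        · rw [if_neg hcm] at hj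
          have hle := hmin _ hc2
          have := getD_mono hsort hj hjl
          omega
    · have hje : j = res.length := by omega
      rw [hje, getD_append_len] at hmem
      rcases mem_append_singleton.mp hmem with h | h
      · have := hresm _ h; omega
      · omega
  · -- freshness 3
    intro j hj hjlen hmem
    rw [hlen] at hjlen
    rcases Nat.lt_or_ge j res.length with hjl | hge
    · rw [getD_append_lt res m hjl] at hmem
      rcases mem_append_singleton.mp hmem with h | h
      · exact hfresh3 j (le_trans hi3'le.1 hj) hjl h
      · rw [hi3'def] at hj
        by_cases hcm : 3 * res.getD i3 0 + 1 = m
        · rw [if_pos hcm] at hj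
          have := getD_smono hsort (show i3 < j by omega) hjl
          omega
        · rw [if_neg hcm] at hj
          have hle := hmin _ hc3
          have := getD_mono hsort hj hjl
          omega
    · have hje : j = res.length := by omega
      rw [hje, getD_append_len] at hmem
      rcases mem_append_singleton.mp hmem with h | h
      · have := hresm _ h; omega
      · omega
  · -- pushed
    intro j hj
    rw [hlen] at hj
    rcases Nat.lt_or_ge j res.length with hjl | hge
    · rw [getD_append_lt res m hjl]
      obtain ⟨h2, h3⟩ := hpushed j hjl
      exact ⟨(hS2mem _).mpr (Or.inl h2), (hS2mem _).mpr (Or.inl h3)⟩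
    · have hje : j = res.length := by omega
      rw [hje, getD_append_len]
      exact ⟨(hS2mem _).mpr (Or.inr (Or.inl rfl)), (hS2mem _).mpr (Or.inr (Or.inr rfl))⟩

theorem main_sim : ∀ (n : Nat) (res heap seen : List Int) (i2 i3 : Nat),
    SimInv res heap seen i2 i3 → aloopA n res heap seen = bloopB n res i2 i3 := by
  intro n
  induction n with
  | zero => intro res heap seen i2 i3 _; rfl
  | succ n ih =>
    intro res heap seen i2 i3 hinv
    obtain ⟨hsort, hnodup, hseen, hlt, hone, hi2, hi3, hchar, hc2, hc3, hfresh2, hfresh3,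
      hpushed⟩ := hinv
    have hne : heap ≠ [] := by intro h; rw [h] at hc2; simp at hc2
    obtain ⟨m, hm⟩ : ∃ m, PySem.List.min? heap (fun x => x) = some m := by
      cases hmm : PySem.List.min? heap (fun x => x) with
      | none => exact absurd ((PySem.List.min?_eq_none_iff heap _).mp hmm) hne
      | some m => exact ⟨m, rfl⟩
    have hmmem : m ∈ heap := PySem.List.min?_mem hm
    have hmin : ∀ y ∈ heap, m ≤ y := PySem.List.min?_isMin hm
    have hm2 : m ≤ 2 * res.getD i2 0 + 1 := hmin _ hc2
    have hm3c : m ≤ 3 * res.getD i3 0 + 1 := hmin _ hc3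
    have hmge : 2 * res.getD i2 0 + 1 ≤ m ∨ 3 * res.getD i3 0 + 1 ≤ m := by
      obtain ⟨j, hj, hcase⟩ := hchar m hmmem
      rcases hcase with ⟨hij, he⟩ | ⟨hij, he⟩
      · left; have := getD_mono hsort hij hj; omega
      · right; have := getD_mono hsort hij hj; omega
    have hnxt : m = if 2 * res.getD i2 0 + 1 < 3 * res.getD i3 0 + 1
        then 2 * res.getD i2 0 + 1 else 3 * res.getD i3 0 + 1 := by
      rcases hmge with h | h <;> split_ifs <;> omega
    -- facts about m
    have hresm : ∀ r ∈ res, r < m := fun r hr => hlt r hr m hmmem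
    have hm3 : 3 ≤ m := by
      obtain ⟨j, hj, hcase⟩ := hchar m hmmem
      have h1 : 1 ≤ res.getD j 0 := hone _ (getD_mem hj)
      rcases hcase with ⟨_, he⟩ | ⟨_, he⟩ <;> omega
    have h3ns : 3*m+1 ∉ seen := by
      intro hmem
      rcases (hseen _).mp hmem with h | h
      · have := hresm _ h; omega
      · obtain ⟨j, hj, hcase⟩ := hchar _ h
        have hjm : res.getD j 0 < m := hresm _ (getD_mem hj)
        rcases hcase with ⟨_, he⟩ | ⟨_, he⟩ <;> omega
    have hremove : (PySem.List.remove? heap m).getD heap = heap.erase m := by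
      rw [PySem.List.remove?_eq_some_erase heap m hmmem]; rfl
    have herase_mem : ∀ v, v ∈ heap.erase m ↔ v ≠ m ∧ v ∈ heap :=
      fun v => List.Nodup.mem_erase_iff hnodup
    have herase_nodup : (heap.erase m).Nodup := hnodup.erase m
    have herase_seen : ∀ v ∈ heap.erase m, v ∈ seen := by
      intro v hv
      exact (hseen v).mpr (Or.inr ((herase_mem v).mp hv).2)
    -- B's side quantities
    have hB : bloopB (n+1) res i2 i3 =
        bloopB n (res ++ [m])
          (if 2 * res.getD i2 0 + 1 = m then i2 + 1 else i2)
          (if 3 * res.getD i3 0 + 1 = m then i3 + 1 else i3) := by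
      simp only [bloopB, PySem.List.pyGet?_natCast, ← List.getD_eq_getElem?_getD, ← hnxt]
    rw [hB]
    by_cases h2s : 2*m+1 ∈ seen
    · -- 2m+1 already seen: only 3m+1 is pushed
      have hA : aloopA (n+1) res heap seen =
          aloopA n (res ++ [m]) (heap.erase m ++ [3*m+1]) (seen ++ [3*m+1]) := by
        have ht : PySem.Set.contains seen (2*m+1) = true := (PySem.Set.contains_iff _ _).mpr h2s
        have hf : ¬ PySem.Set.contains seen (3*m+1) = true :=
          fun h => h3ns ((PySem.Set.contains_iff _ _).mp h)
        simp only [aloopA, hm, List.foldl_cons, List.foldl_nil,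
          PySem.List.remove?_eq_some_erase heap m hmmem, Option.getD_some]
        rw [if_pos ht]
        dsimp only
        rw [if_neg hf, PySem.Set.add_of_not_mem h3ns]
      rw [hA]
      apply ih
      apply reestablish res heap seen _ _ i2 i3 m hsort hseen hlt hone hi2 hi3 hchar hc2 hc3
        hfresh2 hfresh3 hpushed hmmem hmin
      · -- nodup
        rw [List.nodup_append]
        refine ⟨herase_nodup, List.nodup_singleton _, ?_⟩
        intro v hv w hw
        rw [List.mem_singleton] at hw
        subst hw
        intro heq
        exact h3ns (heq ▸ herase_seen _ hv)
      · -- membership of H2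
        intro v
        simp only [List.mem_append, List.mem_singleton, herase_mem]
        constructor
        · rintro (⟨hne', hv⟩ | rfl)
          · exact Or.inl ⟨hv, hne'⟩
          · exact Or.inr (Or.inr rfl)
        · rintro (⟨hv, hne'⟩ | ⟨rfl, habs⟩ | rfl)
          · exact Or.inl ⟨hne', hv⟩
          · exact absurd h2s habs
          · exact Or.inr rfl
      · -- membership of S2
        intro v
        simp only [List.mem_append, List.mem_singleton]
        constructor
        · rintro (hv | rfl)
          · exact Or.inl hv
          · exact Or.inr (Or.inr rfl)
        · rintro (hv | rfl | rfl)
          · exact Or.inl hv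
          · exact Or.inl h2s
          · exact Or.inr rfl
    · -- 2m+1 fresh: both children pushed
      have h3ns' : (3*m+1 : Int) ∉ PySem.Set.add seen (2*m+1) := by
        rw [PySem.Set.add_of_not_mem h2s]
        simp only [List.mem_append, List.mem_singleton]
        rintro (h | h)
        · exact h3ns h
        · omega
      have hA : aloopA (n+1) res heap seen =
          aloopA n (res ++ [m]) ((heap.erase m ++ [2*m+1]) ++ [3*m+1])
            ((seen ++ [2*m+1]) ++ [3*m+1]) := by
        have hff : ¬ PySem.Set.contains seen (2*m+1) = true :=
          fun h => h2s ((PySem.Set.contains_iff _ _).mp h)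
        have hf2 : ¬ PySem.Set.contains (PySem.Set.add seen (2*m+1)) (3*m+1) = true :=
          fun h => h3ns' ((PySem.Set.contains_iff _ _).mp h)
        simp only [aloopA, hm, List.foldl_cons, List.foldl_nil,
          PySem.List.remove?_eq_some_erase heap m hmmem, Option.getD_some]
        rw [if_neg hff]
        dsimp only
        rw [if_neg hf2, PySem.Set.add_of_not_mem h3ns', PySem.Set.add_of_not_mem h2s]
      rw [hA]
      apply ih
      apply reestablish res heap seen _ _ i2 i3 m hsort hseen hlt hone hi2 hi3 hchar hc2 hc3
        hfresh2 hfresh3 hpushed hmmem hmin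
      · -- nodup
        rw [List.nodup_append]
        refine ⟨?_, List.nodup_singleton _, ?_⟩
        · rw [List.nodup_append]
          refine ⟨herase_nodup, List.nodup_singleton _, ?_⟩
          intro v hv w hw
          rw [List.mem_singleton] at hw
          subst hw
          intro heq
          exact h2s (heq ▸ herase_seen _ hv)
        · intro v hv w hw
          rw [List.mem_singleton] at hw
          subst hw
          intro heq
          rcases List.mem_append.mp hv with h | h
          · exact h3ns (heq ▸ herase_seen _ h)
          · rw [List.mem_singleton] at h; omega
      · -- membership of H2
        intro v
        simp only [List.mem_append, List.mem_singleton, herase_mem]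
        constructor
        · rintro ((⟨hne', hv⟩ | rfl) | rfl)
          · exact Or.inl ⟨hv, hne'⟩
          · exact Or.inr (Or.inl ⟨rfl, h2s⟩)
          · exact Or.inr (Or.inr rfl)
        · rintro (⟨hv, hne'⟩ | ⟨rfl, _⟩ | rfl)
          · exact Or.inl (Or.inl ⟨hne', hv⟩)
          · exact Or.inl (Or.inr rfl)
          · exact Or.inr rfl
      · -- membership of S2
        intro v
        simp only [List.mem_append, List.mem_singleton]
        tauto

theorem init_inv : SimInv [1] [3, 4] [1, 3, 4] 0 0 := by
  refine ⟨?_, ?_, ?_, ?_, ?_, ?_, ?_, ?_, ?_, ?_, ?_, ?_, ?_⟩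
  · decide
  · decide
  · intro v; simp
  · intro r hr h hh; simp at hr hh; subst hr; rcases hh with rfl | rfl <;> omega
  · intro r hr; simp at hr; omega
  · decide
  · decide
  · intro h hh
    simp at hh
    rcases hh with rfl | rfl
    · exact ⟨0, by decide⟩
    · exact ⟨0, by decide⟩
  · decide
  · decide
  · intro j hj hjl
    have hj0 : j = 0 := by simp at hjl; omega
    subst hj0; decide
  · intro j hj hjl
    have hj0 : j = 0 := by simp at hjl; omega
    subst hj0; decide
  · intro j hj
    have hj0 : j = 0 := by simp at hj; omega
    subst hj0; exact ⟨by decide, by decide⟩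

theorem gen_unfold (k : Nat) :
    aloopA (k + 1) [] [1] (PySem.Set.ofList [1]) = aloopA k [1] [3, 4] [1, 3, 4] := by
  rfl

-- ===== VERDICT (by name: the statement is the Claim_ definition above) =====
theorem generate_A_spec : Claim_equal_generate_A := by
  unfold Claim_equal_generate_A Spec_generate_A generate_A generate_A_alt
  intro limit _
  by_cases hl : limit ≤ 0
  · rw [if_pos hl]
    have h0 : limit.toNat = 0 := by omega
    rw [h0]
    rfl
  · rw [if_neg hl]
    have hk : limit.toNat = (limit - 1).toNat + 1 := by omega
    rw [hk, gen_unfold]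
    exact main_sim _ _ _ _ _ _ init_inv
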